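-- pv_equiv track=rewrite | github.com/karlson083/python-stepik-middle | 4-list/4_6-4-filling2.py | create_matrix_filling
-- ===== SOURCE A (Python) =====
-- def create_matrix_filling(n1,m1):
--     matrix_out = [[0] * m1 for _ in range(n1)]
--     count = 0
--     for i in range(m1):
--         for j in range(n1):
--             count += 1
--             matrix_out[j][i] = str(count).ljust(2)
--
--     return matrix_out
--     pass
-- ===== SOURCE B (Python) =====
-- def create_matrix_filling(n1, m1):
--     # Each cell (row j, column i) holds the column-major count i*n1 + j + 1,
--     # so build the matrix directly from coordinates: no pre-allocation,
--     # no running counter, no overwrite pass.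
--     return [[str(i * n1 + j + 1).ljust(2) for i in range(m1)]
--             for j in range(n1)]
-- ===== Notes on version B (the rewrite author's own statement) =====
-- stated objective: simpler
-- what changed: Replaces the zero pre-allocation plus column-major overwrite pass driven by a running counter with a single row-major comprehension computing each cell in closed form as i*n1 + j + 1.
import Mathlib
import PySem

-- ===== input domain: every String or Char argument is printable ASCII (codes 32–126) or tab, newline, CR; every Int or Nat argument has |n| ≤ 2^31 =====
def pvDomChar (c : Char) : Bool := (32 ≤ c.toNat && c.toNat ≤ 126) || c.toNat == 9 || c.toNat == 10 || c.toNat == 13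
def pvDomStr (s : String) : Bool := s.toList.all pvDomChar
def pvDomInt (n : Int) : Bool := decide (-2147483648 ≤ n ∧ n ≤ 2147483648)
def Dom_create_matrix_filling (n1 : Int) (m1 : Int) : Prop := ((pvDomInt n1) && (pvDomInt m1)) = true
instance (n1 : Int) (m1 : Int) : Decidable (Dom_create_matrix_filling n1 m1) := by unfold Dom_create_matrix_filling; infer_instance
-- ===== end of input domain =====

-- B replaces A's zero pre-allocation + counter-driven column-major overwrite pass with a
-- direct row-major construction computing each cell in closed form (objective: simpler).

-- str(c).ljust(2), exact on ASCII (pad with spaces to width 2); shared formatting helper of both ports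
def pvFmt (c : Int) : String :=
  String.ofList (PySem.Int.toChars c ++ List.replicate (2 - (PySem.Int.toChars c).length) ' ')

-- ===== PORT A =====
-- [[0] * m1 for _ in range(n1)]: the int placeholder 0 is rendered as the string "0";
-- it is never observable, since every existing cell is overwritten by the fill loops.
def create_matrix_filling (n1 : Int) (m1 : Int) : List (List String) :=
  let matrix_out : List (List String) :=
    (PySem.List.pyRange 0 n1 1).map (fun _ => List.replicate m1.toNat "0")
  let st :=
    (PySem.List.pyRange 0 m1 1).foldl (fun st i =>
      (PySem.List.pyRange 0 n1 1).foldl (fun st2 j =>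
        let c := st2.2 + 1
        (st2.1.set j.toNat ((st2.1.getD j.toNat []).set i.toNat (pvFmt c)), c)) st)
      (matrix_out, (0 : Int))
  st.1

-- ===== PORT B =====
def create_matrix_filling_alt (n1 : Int) (m1 : Int) : List (List String) :=
  (PySem.List.pyRange 0 n1 1).map (fun j =>
    (PySem.List.pyRange 0 m1 1).map (fun i => pvFmt (i * n1 + j + 1)))

-- ===== PRECONDITION & SPEC =====
def Spec_create_matrix_filling (n1 : Int) (m1 : Int) (out : List (List String)) : Prop := out = create_matrix_filling_alt n1 m1
instance (n1 : Int) (m1 : Int) (out : List (List String)) : Decidable (Spec_create_matrix_filling n1 m1 out) := by unfold Spec_create_matrix_filling; infer_instance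

-- ===== CLAIM (what is proved, stated in full; the proofs are below) =====
def Claim_equal_create_matrix_filling : Prop := ∀ (n1 : Int) (m1 : Int), Dom_create_matrix_filling n1 m1 → Spec_create_matrix_filling n1 m1 (create_matrix_filling n1 m1)

-- ===== LEMMAS AND PROOFS =====

-- Matrix state after t full outer (column) iterations and s inner steps of column t:
-- cell (j, i) is filled iff i < t, or i = t and j < s.
def pvMat (n1 m1 : Int) (t s : Nat) : List (List String) :=
  (List.range n1.toNat).map (fun j =>
    (List.range m1.toNat).map (fun i =>
      if i < t ∨ (i = t ∧ j < s) then pvFmt ((i : Int) * n1 + (j : Int) + 1) else "0"))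

-- the loop bodies of port A, over Nat indices
def pvInner (t : Nat) (st2 : List (List String) × Int) (j : Nat) : List (List String) × Int :=
  (st2.1.set j ((st2.1.getD j []).set t (pvFmt (st2.2 + 1))), st2.2 + 1)

theorem pvMat_step (n1 m1 : Int) (t s : Nat)
    (hs : s < n1.toNat) :
    pvInner t (pvMat n1 m1 t s, (t : Int) * n1 + s) s = (pvMat n1 m1 t (s + 1), (t : Int) * n1 + s + 1) := by
  unfold pvInner pvMat
  refine Prod.ext ?_ rfl
  have hrow : ((List.range n1.toNat).map (fun j => (List.range m1.toNat).map (fun i =>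
      if i < t ∨ (i = t ∧ j < s) then pvFmt ((i : Int) * n1 + (j : Int) + 1) else "0"))).getD s []
      = (List.range m1.toNat).map (fun i =>
      if i < t ∨ (i = t ∧ s < s) then pvFmt ((i : Int) * n1 + (s : Int) + 1) else "0") := by
    rw [List.getD_eq_getElem?_getD]
    simp [hs]
  rw [hrow]
  apply List.ext_getElem
  · simp
  · intro k hk1 hk2
    rw [List.getElem_set]
    by_cases hks : s = k
    · subst hks
      simp only [if_true]
      simp only [List.length_map, List.length_range] at hk2
      simp only [List.getElem_map, List.getElem_range]
      apply List.ext_getElem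
      · simp
      · intro i hi1 hi2
        rw [List.getElem_set]
        simp only [List.length_map, List.length_range] at hi2
        by_cases hit : t = i
        · subst hit
          simp only [if_true, List.getElem_map, List.getElem_range]
          simp
        · simp only [if_neg hit, List.getElem_map, List.getElem_range]
          split_ifs with h1 h2 <;> first | rfl | omega
    · simp only [if_neg hks]
      simp only [List.length_set, List.length_map, List.length_range] at hk1
      simp only [List.getElem_map, List.getElem_range]
      apply List.map_congr_left
      intro i _
      split_ifs with h1 h2 <;> first | rfl | omega

theorem pvInner_loop (n1 m1 : Int) (t : Nat) (s : Nat)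
    (hs : s ≤ n1.toNat) :
    (List.range s).foldl (pvInner t) (pvMat n1 m1 t 0, (t : Int) * n1) =
      (pvMat n1 m1 t s, (t : Int) * n1 + s) := by
  induction s with
  | zero => simp
  | succ s ih =>
    rw [List.range_succ, List.foldl_append, ih (by omega)]
    simp only [List.foldl_cons, List.foldl_nil]
    rw [pvMat_step n1 m1 t s (by omega)]
    congr 1
    push_cast
    ring

-- a filled column closes: all rows done at column t = no rows done at column t+1
theorem pvMat_roll (n1 m1 : Int) (t : Nat) :
    pvMat n1 m1 t n1.toNat = pvMat n1 m1 (t + 1) 0 := by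
  unfold pvMat
  apply List.map_congr_left
  intro j hj
  apply List.map_congr_left
  intro i _
  simp only [List.mem_range] at hj
  split_ifs with h1 h2 <;> first | rfl | omega

theorem pvOuter_loop (n1 m1 : Int) (hn : 0 < n1) (t : Nat) (ht : t ≤ m1.toNat) :
    (List.range t).foldl (fun st i => (List.range n1.toNat).foldl (pvInner i) st)
        (pvMat n1 m1 0 0, 0) =
      (pvMat n1 m1 t 0, (t : Int) * n1) := by
  induction t with
  | zero => simp
  | succ t ih =>
    rw [List.range_succ, List.foldl_append, ih (by omega)]
    simp only [List.foldl_cons, List.foldl_nil]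
    rw [pvInner_loop n1 m1 t n1.toNat le_rfl, pvMat_roll]
    have : ((t : Int) + 1) * n1 = (t : Int) * n1 + n1.toNat := by
      rw [Int.toNat_of_nonneg (by omega)]; ring
    rw [Int.toNat_of_nonneg (by omega)]
    congr 1
    push_cast
    ring

-- the initial matrix is the t = 0, s = 0 state
theorem pvMat_init (n1 m1 : Int) :
    (List.range n1.toNat).map (fun _ => List.replicate m1.toNat "0") = pvMat n1 m1 0 0 := by
  unfold pvMat
  apply List.map_congr_left
  intro j _
  apply List.ext_getElem <;> simp

-- the fully filled matrix is port B's matrix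
theorem pvMat_final (n1 m1 : Int) (_hn : 0 < n1) (_hm : 0 < m1) :
    pvMat n1 m1 m1.toNat 0 = create_matrix_filling_alt n1 m1 := by
  unfold pvMat create_matrix_filling_alt
  rw [PySem.List.pyRange_one 0 n1, PySem.List.pyRange_one 0 m1, List.map_map]
  simp only [sub_zero, List.map_map]
  apply List.map_congr_left
  intro j hj
  apply List.map_congr_left
  intro i hi
  simp only [List.mem_range] at hi
  rw [if_pos (by omega)]
  simp [Function.comp]

-- ===== VERDICT (by name: the statement is the Claim_ definition above) =====
theorem create_matrix_filling_spec : Claim_equal_create_matrix_filling := by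
  intro n1 m1 _
  unfold Spec_create_matrix_filling
  by_cases hn : 0 < n1
  · by_cases hm : 0 < m1
    · -- main case: both loops run; the invariant pvMat tracks the fill
      unfold create_matrix_filling
      rw [PySem.List.pyRange_one 0 n1, PySem.List.pyRange_one 0 m1]
      simp only [sub_zero, List.foldl_map, zero_add, Int.toNat_natCast, List.map_map]
      have h1 : List.map ((fun _ : Int => List.replicate m1.toNat "0") ∘ fun k : Nat => (k : Int))
          (List.range n1.toNat) = pvMat n1 m1 0 0 := by
        rw [← pvMat_init n1 m1]; rfl
      rw [h1]
      show ((List.range m1.toNat).foldl (fun st i => (List.range n1.toNat).foldl (pvInner i) st)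
        (pvMat n1 m1 0 0, 0)).1 = _
      rw [pvOuter_loop n1 m1 hn m1.toNat le_rfl]
      exact pvMat_final n1 m1 hn hm
    · -- m1 ≤ 0: rows exist but are empty; the outer loop is empty
      unfold create_matrix_filling create_matrix_filling_alt
      rw [PySem.List.pyRange_one_eq_nil (by omega : m1 ≤ 0)]
      simp [Int.toNat_of_nonpos (by omega : m1 ≤ 0)]
  · -- n1 ≤ 0: no rows; the inner loop is empty, the outer loop keeps the state fixed
    unfold create_matrix_filling create_matrix_filling_alt
    rw [PySem.List.pyRange_one_eq_nil (by omega : n1 ≤ 0)]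
    simp
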